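-- pv_equiv track=rewrite | github.com/Lantuu/perf_code | perf_code/user_guide/release/get_desc.py | tag_segment_split
-- ===== SOURCE A (Python) =====
-- def tag_segment_split(tag, data, add):
--     """
--     根据不用的标签把data分成多个segment
--     :param tag: str, 标签 '----' or '====' or '#' or '```'
--     :param data: list, 待分段的数据
--     :param add: boolean, 是否把带标签的那一行数据加入分段
--     :return segment_list:  list,  分好的段
--     """
--     segment_list = []  # 存放分好的段
--     tem_segment = []  # 暂时存放中间产生的段
--     if not add:
--         for line in data:
--             if line.strip().startswith(tag) and len(tem_segment) != 0:
--                 segment_list.append(tem_segment)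
--                 tem_segment = []
--             elif line.strip().startswith(tag) and len(tem_segment) == 0:
--                 continue
--             elif line.strip() == '':
--                 continue
--             else:
--                 tem_segment.append(line)
--         segment_list.append(tem_segment)
--     if add:
--         for line in data:
--             if line.strip().startswith(tag) and len(tem_segment) != 0:
--                 segment_list.append(tem_segment)
--                 tem_segment = []
--                 tem_segment.append(line)
--             elif line.strip().startswith(tag) and len(tem_segment) == 0:
--                 tem_segment.append(line)
--             elif line.strip() == '':
--                 continue
--             else:
--                 tem_segment.append(line)
--         segment_list.append(tem_segment)
--     return segment_list
-- ===== SOURCE B (Python) =====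
-- def tag_segment_split(tag, data, add):
--     """Chunk-scanning re-implementation: jump from tag marker to tag marker,
--     grabbing the non-blank lines between two markers as one segment."""
--     def is_tag(line):
--         return line.strip().startswith(tag)
--
--     def grab(i):
--         # collect non-blank lines from position i up to the next tag line (or end)
--         seg = []
--         while i < len(data) and not is_tag(data[i]):
--             if data[i].strip() != '':
--                 seg.append(data[i])
--             i += 1
--         return seg, i
--
--     head, i = grab(0)
--     if i == len(data):
--         return [head]
--     out = [head] if head else []
--     while True:
--         t = data[i]
--         body, j = grab(i + 1)
--         seg = ([t] if add else []) + body
--         if j == len(data):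
--             out.append(seg)
--             return out
--         if seg:
--             out.append(seg)
--         i = j
-- ===== Notes on version B (the rewrite author's own statement) =====
-- stated objective: alternative
-- what changed: Replaces A's two near-duplicate per-line state machines (selected by `add`, carrying a pending-segment accumulator) with a single chunk scanner that jumps from tag marker to tag marker and collects the non-blank lines between two markers as one segment.
import Mathlib
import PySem

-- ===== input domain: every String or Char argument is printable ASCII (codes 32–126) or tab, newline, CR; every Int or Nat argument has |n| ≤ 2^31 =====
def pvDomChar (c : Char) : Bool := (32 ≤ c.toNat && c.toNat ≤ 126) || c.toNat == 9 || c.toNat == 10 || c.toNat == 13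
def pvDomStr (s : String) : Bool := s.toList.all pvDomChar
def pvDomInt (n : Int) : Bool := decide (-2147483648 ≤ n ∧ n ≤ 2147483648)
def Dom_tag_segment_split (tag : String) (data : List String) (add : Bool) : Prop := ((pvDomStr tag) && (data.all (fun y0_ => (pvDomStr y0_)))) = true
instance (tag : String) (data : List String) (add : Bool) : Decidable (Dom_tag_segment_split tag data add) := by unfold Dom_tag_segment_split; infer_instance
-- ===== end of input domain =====

-- B replaces A's per-line state machine (two near-duplicate loops selected by `add`) by a
-- chunk scanner that jumps from tag marker to tag marker, collecting the non-blank lines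
-- between two markers as one segment (objective: simpler/alternative decomposition, same cost).

-- ===== PORT A =====
-- A's loop body for the `not add` branch, transliterated
def pvStepNoAdd (tag : String) (st : List (List String) × List String) (line : String) :
    List (List String) × List String :=
  if PySem.Str.startswith (PySem.Str.strip line) tag && st.2.length != 0 then
    (st.1 ++ [st.2], [])
  else if PySem.Str.startswith (PySem.Str.strip line) tag && st.2.length == 0 then
    st
  else if PySem.Str.strip line == "" then
    st
  else
    (st.1, st.2 ++ [line])

-- A's loop body for the `add` branch, transliterated
def pvStepAdd (tag : String) (st : List (List String) × List String) (line : String) :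
    List (List String) × List String :=
  if PySem.Str.startswith (PySem.Str.strip line) tag && st.2.length != 0 then
    (st.1 ++ [st.2], [line])
  else if PySem.Str.startswith (PySem.Str.strip line) tag && st.2.length == 0 then
    (st.1, st.2 ++ [line])
  else if PySem.Str.strip line == "" then
    st
  else
    (st.1, st.2 ++ [line])

def tag_segment_split (tag : String) (data : List String) (add : Bool) : List (List String) :=
  if !add then
    let st := data.foldl (pvStepNoAdd tag) (([] : List (List String)), ([] : List String))
    st.1 ++ [st.2]
  else
    let st := data.foldl (pvStepAdd tag) (([] : List (List String)), ([] : List String))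
    st.1 ++ [st.2]

-- ===== PORT B =====
-- line.strip().startswith(tag)
def pvIsTag (tag line : String) : Bool :=
  PySem.Str.startswith (PySem.Str.strip line) tag

-- B's `grab`: non-blank lines up to the next tag line, plus the remaining suffix
def pvGrab (tag : String) : List String → List String × List String
  | [] => ([], [])
  | x :: xs =>
    if pvIsTag tag x then ([], x :: xs)
    else
      let r := pvGrab tag xs
      ((if PySem.Str.strip x == "" then r.1 else x :: r.1), r.2)

theorem pvGrab_len (tag : String) (l : List String) : (pvGrab tag l).2.length ≤ l.length := by
  induction l with
  | nil => simp [pvGrab]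
  | cons x xs ih =>
    simp only [pvGrab]
    split
    · simp
    · simpa using Nat.le_succ_of_le ih

-- B's `while True` loop: `t` is the current tag line, `rest` the lines after it
def pvLoop (tag : String) (add : Bool) (t : String) (rest : List String) : List (List String) :=
  match h : (pvGrab tag rest).2 with
  | [] => [(if add then [t] else []) ++ (pvGrab tag rest).1]
  | t' :: r' =>
      (if ((if add then [t] else []) ++ (pvGrab tag rest).1).isEmpty then []
       else [(if add then [t] else []) ++ (pvGrab tag rest).1]) ++ pvLoop tag add t' r'
termination_by rest.length
decreasing_by
  have hle := pvGrab_len tag rest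
  rw [h] at hle
  simp at hle
  omega

def tag_segment_split_alt (tag : String) (data : List String) (add : Bool) : List (List String) :=
  let g := pvGrab tag data
  match g.2 with
  | [] => [g.1]
  | t :: r => (if g.1.isEmpty then [] else [g.1]) ++ pvLoop tag add t r

-- ===== PRECONDITION & SPEC =====
def Spec_tag_segment_split (tag : String) (data : List String) (add : Bool) (out : List (List String)) : Prop := out = tag_segment_split_alt tag data add
instance (tag : String) (data : List String) (add : Bool) (out : List (List String)) : Decidable (Spec_tag_segment_split tag data add out) := by unfold Spec_tag_segment_split; infer_instance

-- ===== CLAIM (what is proved, stated in full; the proofs are below) =====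
def Claim_equal_tag_segment_split : Prop := ∀ (tag : String) (data : List String) (add : Bool), Dom_tag_segment_split tag data add → Spec_tag_segment_split tag data add (tag_segment_split tag data add)

-- ===== LEMMAS AND PROOFS =====

-- A's remainder, written as structural recursion over the pending segment `cur`
def pvRem (tag : String) (add : Bool) (cur : List String) : List String → List (List String)
  | [] => [cur]
  | x :: xs =>
    if pvIsTag tag x then
      (if cur.isEmpty then [] else [cur]) ++ pvRem tag add (if add then [x] else []) xs
    else if PySem.Str.strip x == "" then pvRem tag add cur xs
    else pvRem tag add (cur ++ [x]) xs

theorem foldl_noAdd_rem (tag : String) (xs : List String) :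
    ∀ (segs : List (List String)) (cur : List String),
      (xs.foldl (pvStepNoAdd tag) (segs, cur)).1 ++ [(xs.foldl (pvStepNoAdd tag) (segs, cur)).2]
        = segs ++ pvRem tag false cur xs := by
  induction xs with
  | nil => intro segs cur; simp [pvRem]
  | cons x xs ih =>
    intro segs cur
    by_cases ht : pvIsTag tag x
    · by_cases hc : cur = []
      · subst hc
        simp [pvStepNoAdd, pvRem, pvIsTag] at ht ⊢
        simp [ht, ih]
      · have hlen : cur.length ≠ 0 := by simpa using hc
        simp [pvStepNoAdd, pvRem, pvIsTag] at ht ⊢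
        simp [ht, hlen, hc, ih]
    · by_cases hb : PySem.Str.strip x = ""
      · simp [pvStepNoAdd, pvRem, pvIsTag] at ht ⊢
        simp [ht, hb, ih]
      · simp [pvStepNoAdd, pvRem, pvIsTag] at ht ⊢
        simp [ht, hb, ih]

theorem foldl_add_rem (tag : String) (xs : List String) :
    ∀ (segs : List (List String)) (cur : List String),
      (xs.foldl (pvStepAdd tag) (segs, cur)).1 ++ [(xs.foldl (pvStepAdd tag) (segs, cur)).2]
        = segs ++ pvRem tag true cur xs := by
  induction xs with
  | nil => intro segs cur; simp [pvRem]
  | cons x xs ih =>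
    intro segs cur
    by_cases ht : pvIsTag tag x
    · by_cases hc : cur = []
      · subst hc
        simp [pvStepAdd, pvRem, pvIsTag] at ht ⊢
        simp [ht, ih]
      · have hlen : cur.length ≠ 0 := by simpa using hc
        simp [pvStepAdd, pvRem, pvIsTag] at ht ⊢
        simp [ht, hlen, hc, ih]
    · by_cases hb : PySem.Str.strip x = ""
      · simp [pvStepAdd, pvRem, pvIsTag] at ht ⊢
        simp [ht, hb, ih]
      · simp [pvStepAdd, pvRem, pvIsTag] at ht ⊢
        simp [ht, hb, ih]

theorem rem_eq_grab (tag : String) (add : Bool) (xs : List String) :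
    ∀ (cur : List String),
      pvRem tag add cur xs =
        (match (pvGrab tag xs).2 with
         | [] => [cur ++ (pvGrab tag xs).1]
         | t :: r =>
             (if (cur ++ (pvGrab tag xs).1).isEmpty then [] else [cur ++ (pvGrab tag xs).1])
               ++ pvLoop tag add t r) := by
  induction xs with
  | nil => intro cur; simp [pvRem, pvGrab]
  | cons x xs ih =>
    intro cur
    by_cases ht : pvIsTag tag x
    · have hrec : pvRem tag add (if add then [x] else []) xs = pvLoop tag add x xs := by
        rw [ih (if add then [x] else []), pvLoop.eq_def]
        repeat' split
        all_goals simp_all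
      simp [pvRem, pvGrab, ht, hrec]
    · by_cases hb : PySem.Str.strip x = ""
      · have hb' : (PySem.Str.strip x == "") = true := by simp [hb]
        simp only [pvRem, pvGrab, ht, Bool.false_eq_true, if_false, hb', if_true]
        exact ih cur
      · have hb' : (PySem.Str.strip x == "") = false := by simp [hb]
        simp only [pvRem, pvGrab, ht, Bool.false_eq_true, if_false, hb']
        rw [ih (cur ++ [x])]
        simp

-- ===== VERDICT (by name: the statement is the Claim_ definition above) =====
theorem tag_segment_split_spec : Claim_equal_tag_segment_split := by
  intro tag data add _
  unfold Spec_tag_segment_split tag_segment_split tag_segment_split_alt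
  cases add with
  | false =>
    simp only [Bool.not_false, if_pos]
    rw [foldl_noAdd_rem tag data [] [], rem_eq_grab tag false data []]
    simp
  | true =>
    simp only [Bool.not_true, Bool.false_eq_true, if_false]
    rw [foldl_add_rem tag data [] [], rem_eq_grab tag true data []]
    simp
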